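-- pv_equiv track=rewrite | github.com/codeforbirmingham/Open-Disclosure | utils/CompareYears.py | arrangeByYear
-- ===== SOURCE A (Python) =====
-- def arrangeByYear(records):
--     byYear = {}
--     for record in records:
--         if record['filed_year'] in byYear:
--             byYear[record['filed_year']].append(record)
--         else:
--             byYear[record['filed_year']] = [record]
--     years = list(byYear.keys())
--     years.sort()
--     combined = []
--     setLengths = {}
--     for year in years:
--         setLengths[year] = len(byYear[year])
--         combined += byYear[year]
--     return (combined, setLengths)
-- ===== SOURCE B (Python) =====
-- def arrangeByYear(records):
--     combined = sorted(records, key=lambda r: r['filed_year'])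
--     counts = {}
--     for record in records:
--         y = record['filed_year']
--         counts[y] = counts.get(y, 0) + 1
--     setLengths = dict(sorted(counts.items(), key=lambda kv: kv[0]))
--     return (combined, setLengths)
-- ===== Notes on version B (the rewrite author's own statement) =====
-- stated objective: simpler
-- what changed: Replaces the group-into-dict-then-concatenate-sorted-groups phases with one stable sort of the whole record list by filed_year plus a separate counting pass whose counts are sorted by year.
import Mathlib
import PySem

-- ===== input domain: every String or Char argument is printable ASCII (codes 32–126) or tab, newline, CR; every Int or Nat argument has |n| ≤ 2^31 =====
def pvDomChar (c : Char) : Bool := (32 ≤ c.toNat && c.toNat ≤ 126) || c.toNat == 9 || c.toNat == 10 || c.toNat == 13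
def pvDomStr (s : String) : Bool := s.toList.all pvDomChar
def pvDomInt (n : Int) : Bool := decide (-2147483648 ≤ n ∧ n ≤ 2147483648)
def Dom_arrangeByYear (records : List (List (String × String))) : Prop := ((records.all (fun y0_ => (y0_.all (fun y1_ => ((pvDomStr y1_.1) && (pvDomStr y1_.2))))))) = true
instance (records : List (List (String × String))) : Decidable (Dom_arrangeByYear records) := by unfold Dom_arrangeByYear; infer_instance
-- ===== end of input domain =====

-- B replaces A's group-into-dict-then-concatenate with one stable sort of the records
-- by filed_year plus a separate counting pass (simpler, same observable result).

-- record['filed_year'] — first-match lookup; Python raises KeyError when the key is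
-- missing, which Pre_arrangeByYear excludes (the "" default is never used under Pre_).
def fyGet (r : List (String × String)) : String :=
  (PySem.Dict.mk r).getD "filed_year" ""

-- ===== PORT A =====
def arrangeByYear (records : List (List (String × String))) : (List (List (String × String))) × (List (String × Int)) :=
  let byYear := records.foldl (fun d r =>
      if d.contains (fyGet r) then d.modify (fyGet r) [] (fun g => g ++ [r])
      else d.insert (fyGet r) [r]) PySem.Dict.empty
  let years := PySem.List.sorted byYear.keys (fun y => y) false
  let combined := years.foldl (fun acc y => acc ++ byYear.getD y []) []
  let setLengths := years.foldl (fun d y => d.insert y ((byYear.getD y []).length : Int)) PySem.Dict.empty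
  (combined, setLengths.items)

-- ===== PORT B =====
def arrangeByYear_alt (records : List (List (String × String))) : (List (List (String × String))) × (List (String × Int)) :=
  let combined := PySem.List.sorted records fyGet false
  let counts := records.foldl (fun d r => d.insert (fyGet r) (d.getD (fyGet r) 0 + 1)) PySem.Dict.empty
  let setLengths := PySem.List.sorted counts.items (fun p => p.1) false
  (combined, setLengths)

-- ===== PRECONDITION & SPEC =====
-- Pre_ excludes exactly the records without a 'filed_year' key, on which A raises KeyError.
def Pre_arrangeByYear (records : List (List (String × String))) : Prop :=
  ∀ r ∈ records, r.any (fun p => p.1 == "filed_year") = true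
instance (records : List (List (String × String))) : Decidable (Pre_arrangeByYear records) := by unfold Pre_arrangeByYear; infer_instance

def pvWitness_arrangeByYear : (List (List (String × String))) :=
  [[("filed_year", "2015"), ("name", "x")], [("filed_year", "2014")]]

def Spec_arrangeByYear (records : List (List (String × String))) (out : (List (List (String × String))) × (List (String × Int))) : Prop := out = arrangeByYear_alt records
instance (records : List (List (String × String))) (out : (List (List (String × String))) × (List (String × Int))) : Decidable (Spec_arrangeByYear records out) := by unfold Spec_arrangeByYear; infer_instance

-- ===== CLAIM (what is proved, stated in full; the proofs are below) =====
def Claim_equal_arrangeByYear : Prop := ∀ (records : List (List (String × String))), Dom_arrangeByYear records → Pre_arrangeByYear records → Spec_arrangeByYear records (arrangeByYear records)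

-- ===== LEMMAS AND PROOFS =====

-- insertion of x into l1 ++ l2 when x goes exactly between them
lemma insertBy_split {α : Type} (bef : α → α → Bool) (x : α) (l1 l2 : List α)
    (h1 : ∀ a ∈ l1, bef x a = false) (h2 : ∀ b ∈ l2, bef x b = true) :
    PySem.List.insertBy bef x (l1 ++ l2) = l1 ++ x :: l2 := by
  induction l1 with
  | nil =>
    cases l2 with
    | nil => simp [PySem.List.insertBy]
    | cons b t => simp [PySem.List.insertBy, h2 b (by simp)]
  | cons a t ih =>
    have ha := h1 a (by simp)
    simp [PySem.List.insertBy, ha]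
    exact ih (fun a ha' => h1 a (by simp [ha']))

lemma mem_group_fy (rs : List (List (String × String))) (y : String)
    (a : List (String × String)) (ha : a ∈ rs.filter (fun r => fyGet r == y)) :
    fyGet a = y := by
  have := List.mem_filter.mp ha
  simpa using this.2

lemma head_dropWhile_false {α : Type} (p : α → Bool) (l : List α) (b : α) (t : List α)
    (h : l.dropWhile p = b :: t) : p b = false := by
  induction l with
  | nil => simp at h
  | cons x xs ih =>
    by_cases hx : p x
    · exact ih (by simpa [List.dropWhile_cons, hx] using h)
    · rw [List.dropWhile_cons_of_neg (by simpa using hx)] at h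
      cases h; simpa using hx

lemma flatMap_congr_mem {α β : Type} (l : List α) (f g : α → List β)
    (h : ∀ a ∈ l, f a = g a) : l.flatMap f = l.flatMap g := by
  induction l with
  | nil => rfl
  | cons a t ih =>
    simp only [List.flatMap_cons, h a (by simp), ih (fun a ha => h a (by simp [ha]))]

-- the central lemma: a stable sort by key equals concatenating, in sorted key order,
-- the groups of records with that key (in original order)
lemma stable_group (rs : List (List (String × String))) :
    PySem.List.sorted rs fyGet false =
      (PySem.List.sorted (PySem.Set.ofList (rs.map fyGet)) (fun y => y) false).flatMap
        (fun y => rs.filter (fun r => fyGet r == y)) := by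
  induction rs using List.reverseRecOn with
  | nil => rfl
  | append_singleton rs r ih =>
    have hlhs : PySem.List.sorted (rs ++ [r]) fyGet false
        = PySem.List.insertBy (fun a b => decide (fyGet a < fyGet b)) r
            (PySem.List.sorted rs fyGet false) := by
      rw [PySem.List.sorted_eq_foldl_insertBy, PySem.List.sorted_eq_foldl_insertBy,
        List.foldl_append]
      rfl
    have hpw : (PySem.List.sorted (PySem.Set.ofList (rs.map fyGet)) (fun y => y) false).Pairwise (· < ·) :=
      PySem.List.sorted_ofList_pairwise_lt _
    have hsplit : (PySem.List.sorted (PySem.Set.ofList (rs.map fyGet)) (fun y => y) false).takeWhile (fun y => decide (y < fyGet r))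
        ++ (PySem.List.sorted (PySem.Set.ofList (rs.map fyGet)) (fun y => y) false).dropWhile (fun y => decide (y < fyGet r))
        = PySem.List.sorted (PySem.Set.ofList (rs.map fyGet)) (fun y => y) false :=
      List.takeWhile_append_dropWhile
    set S := PySem.List.sorted (PySem.Set.ofList (rs.map fyGet)) (fun y => y) false with hSdef
    set k := fyGet r with hkdef
    set L1 := S.takeWhile (fun y => decide (y < k)) with hL1def
    set L2 := S.dropWhile (fun y => decide (y < k)) with hL2def
    have hmemL1 : ∀ a ∈ L1, a < k := by
      intro a ha; simpa using List.mem_takeWhile_imp ha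
    have hpwL2 : L2.Pairwise (· < ·) := List.Pairwise.sublist (List.dropWhile_sublist _) hpw
    have hgeL2 : ∀ b ∈ L2, k ≤ b := by
      intro b hb
      rcases hL2eq : L2 with _ | ⟨h0, T⟩
      · rw [hL2eq] at hb; simp at hb
      · have hh0 : k ≤ h0 := by
          have := head_dropWhile_false (fun y => decide (y < k)) S h0 T (by rw [← hL2def, hL2eq])
          simpa using this
        rw [hL2eq] at hb hpwL2
        rcases List.mem_cons.mp hb with rfl | hbT
        · exact hh0
        · exact le_of_lt (lt_of_le_of_lt hh0 ((List.pairwise_cons.mp hpwL2).1 b hbT))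
    have hgrp : ∀ y, (rs ++ [r]).filter (fun r' => fyGet r' == y)
        = rs.filter (fun r' => fyGet r' == y) ++ (if k = y then [r] else []) := by
      intro y
      rw [List.filter_append]
      congr 1
      by_cases hy : k = y
      · simp [List.filter, ← hkdef, hy]
      · simp [List.filter, ← hkdef, hy, beq_eq_false_iff_ne.mpr hy]
    have hofmap : PySem.Set.ofList ((rs ++ [r]).map fyGet) = PySem.Set.add (PySem.Set.ofList (rs.map fyGet)) k := by
      simp [PySem.Set.ofList, List.foldl_append, ← hkdef]
    have hmemflat : ∀ (L : List String) a, a ∈ L.flatMap (fun y => rs.filter (fun r' => fyGet r' == y)) →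
        ∃ y ∈ L, fyGet a = y := by
      intro L a ha
      rcases List.mem_flatMap.mp ha with ⟨y, hy, hay⟩
      exact ⟨y, hy, mem_group_fy rs y a hay⟩
    by_cases hkmem : k ∈ rs.map fyGet
    · -- year already present: the sorted key list is unchanged; r joins its group at the end
      have hadd : PySem.Set.ofList ((rs ++ [r]).map fyGet) = PySem.Set.ofList (rs.map fyGet) := by
        rw [hofmap]
        have hmem : k ∈ PySem.Set.ofList (rs.map fyGet) := (PySem.Set.mem_ofList _ _).mpr hkmem
        have hc : (PySem.Set.ofList (rs.map fyGet)).contains k = true :=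
          List.contains_iff_mem.mpr hmem
        simp only [PySem.Set.add]
        rw [hc]
        simp
      have hkS : k ∈ S := by
        rw [hSdef, PySem.List.mem_sorted]
        exact (PySem.Set.mem_ofList _ _).mpr hkmem
      rcases hL2eq : L2 with _ | ⟨h0, T⟩
      · exfalso
        rw [← hsplit, hL2eq, List.append_nil] at hkS
        exact lt_irrefl k (hmemL1 k hkS)
      have hkh0 : k = h0 := by
        have hkL2 : k ∈ L2 := by
          rw [← hsplit] at hkS
          rcases List.mem_append.mp hkS with h | h
          · exact absurd (hmemL1 k h) (lt_irrefl k)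
          · exact h
        rw [hL2eq] at hkL2
        have hpwL2' := hL2eq ▸ hpwL2
        rcases List.mem_cons.mp hkL2 with h | h
        · exact h
        · exfalso
          have h0k : h0 < k := (List.pairwise_cons.mp hpwL2').1 k h
          have : k ≤ h0 := hgeL2 h0 (by rw [hL2eq]; simp)
          exact absurd h0k (not_lt.mpr this)
      have hltT : ∀ c ∈ T, k < c := by
        intro c hc
        have hpwL2' := hL2eq ▸ hpwL2
        exact hkh0 ▸ (List.pairwise_cons.mp hpwL2').1 c hc
      have hSdecomp : S = L1 ++ k :: T := by
        rw [← hsplit, hL2eq, hkh0]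
      have h1 : ∀ a ∈ (L1.flatMap (fun y => rs.filter (fun r' => fyGet r' == y))
            ++ rs.filter (fun r' => fyGet r' == k)),
          (fun a b => decide (fyGet a < fyGet b)) r a = false := by
        intro a ha
        rcases List.mem_append.mp ha with h | h
        · rcases hmemflat L1 a h with ⟨y, hy, hay⟩
          have hak : fyGet a < k := hay ▸ hmemL1 y hy
          simp only [decide_eq_false_iff_not, ← hkdef]
          exact not_lt.mpr (le_of_lt hak)
        · have hak : fyGet a = k := mem_group_fy rs k a h
          simp only [decide_eq_false_iff_not, ← hkdef, hak]
          exact lt_irrefl k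
      have h2 : ∀ b ∈ T.flatMap (fun y => rs.filter (fun r' => fyGet r' == y)),
          (fun a b => decide (fyGet a < fyGet b)) r b = true := by
        intro b hb
        rcases hmemflat T b hb with ⟨y, hy, hby⟩
        simp only [decide_eq_true_eq, ← hkdef, hby]
        exact hltT y hy
      have hins := insertBy_split (fun a b => decide (fyGet a < fyGet b)) r
        (L1.flatMap (fun y => rs.filter (fun r' => fyGet r' == y))
            ++ rs.filter (fun r' => fyGet r' == k))
        (T.flatMap (fun y => rs.filter (fun r' => fyGet r' == y))) h1 h2
      rw [hadd, ← hSdef, hlhs, ih, hSdecomp]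
      rw [List.flatMap_append, List.flatMap_cons, List.flatMap_append, List.flatMap_cons]
      rw [flatMap_congr_mem L1 _ _ (fun y _ => hgrp y), flatMap_congr_mem T _ _ (fun y _ => hgrp y)]
      have hL1g : L1.flatMap (fun y => (rs.filter (fun r' => fyGet r' == y) ++ if k = y then [r] else []))
          = L1.flatMap (fun y => rs.filter (fun r' => fyGet r' == y)) := by
        apply flatMap_congr_mem
        intro y hy
        have : k ≠ y := ne_of_gt (hmemL1 y hy)
        simp [this]
      have hTg : T.flatMap (fun y => (rs.filter (fun r' => fyGet r' == y) ++ if k = y then [r] else []))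
          = T.flatMap (fun y => rs.filter (fun r' => fyGet r' == y)) := by
        apply flatMap_congr_mem
        intro y hy
        have : k ≠ y := ne_of_lt (hltT y hy)
        simp [this]
      rw [hL1g, hTg, hgrp k, if_pos rfl]
      have hassoc : L1.flatMap (fun y => rs.filter (fun r' => fyGet r' == y))
            ++ (rs.filter (fun r' => fyGet r' == k)
              ++ T.flatMap (fun y => rs.filter (fun r' => fyGet r' == y)))
          = (L1.flatMap (fun y => rs.filter (fun r' => fyGet r' == y))
              ++ rs.filter (fun r' => fyGet r' == k))
            ++ T.flatMap (fun y => rs.filter (fun r' => fyGet r' == y)) :=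
        (List.append_assoc _ _ _).symm
      rw [hassoc, hins]
      simp [List.append_assoc]
    · -- new year: it is inserted between L1 and L2, with the singleton group [r]
      have hnotmem : k ∉ PySem.Set.ofList (rs.map fyGet) :=
        fun h => hkmem ((PySem.Set.mem_ofList _ _).mp h)
      have hc : (PySem.Set.ofList (rs.map fyGet)).contains k = false := by
        by_contra h
        exact hnotmem (List.contains_iff_mem.mp (by simpa using h))
      have hadd : PySem.Set.ofList ((rs ++ [r]).map fyGet)
          = PySem.Set.ofList (rs.map fyGet) ++ [k] := by
        rw [hofmap]
        simp only [PySem.Set.add]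
        rw [hc]
        simp
      have hkS : k ∉ S := by
        rw [hSdef, PySem.List.mem_sorted]
        exact fun h => hkmem ((PySem.Set.mem_ofList _ _).mp h)
      have hltL2 : ∀ b ∈ L2, k < b := by
        intro b hb
        rcases lt_or_eq_of_le (hgeL2 b hb) with h | h
        · exact h
        · exact absurd (h ▸ List.Sublist.mem hb (List.dropWhile_sublist _)) hkS
      have hnewS : PySem.List.sorted (PySem.Set.ofList (rs.map fyGet) ++ [k]) (fun y => y) false
          = L1 ++ k :: L2 := by
        apply PySem.List.sorted_eq_of_perm_of_pairwise_lt
        · have hp1 : (L1 ++ k :: L2).Perm (k :: S) := by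
            rw [← hsplit]; exact List.perm_middle
          have hp2 : (k :: S).Perm (S ++ [k]) := (List.perm_append_singleton k S).symm
          have hp3 : (S ++ [k]).Perm (PySem.Set.ofList (rs.map fyGet) ++ [k]) :=
            (PySem.List.sorted_perm _ _ _).append_right [k]
          exact hp1.trans (hp2.trans hp3)
        · rw [List.pairwise_append]
          refine ⟨List.Pairwise.sublist (List.takeWhile_sublist _) hpw, ?_, ?_⟩
          · rw [List.pairwise_cons]
            exact ⟨hltL2, hpwL2⟩
          · intro a ha b hb
            rcases List.mem_cons.mp hb with rfl | hb'
            · exact hmemL1 a ha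
            · exact lt_trans (hmemL1 a ha) (hltL2 b hb')
      have hgrpk : rs.filter (fun r' => fyGet r' == k) = [] := by
        rw [List.filter_eq_nil_iff]
        intro a ha hak
        exact hkmem (List.mem_map.mpr ⟨a, ha, beq_iff_eq.mp hak⟩)
      have h1 : ∀ a ∈ L1.flatMap (fun y => rs.filter (fun r' => fyGet r' == y)),
          (fun a b => decide (fyGet a < fyGet b)) r a = false := by
        intro a ha
        rcases hmemflat L1 a ha with ⟨y, hy, hay⟩
        have hak : fyGet a < k := hay ▸ hmemL1 y hy
        simp only [decide_eq_false_iff_not, ← hkdef]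
        exact not_lt.mpr (le_of_lt hak)
      have h2 : ∀ b ∈ L2.flatMap (fun y => rs.filter (fun r' => fyGet r' == y)),
          (fun a b => decide (fyGet a < fyGet b)) r b = true := by
        intro b hb
        rcases hmemflat L2 b hb with ⟨y, hy, hby⟩
        simp only [decide_eq_true_eq, ← hkdef, hby]
        exact hltL2 y hy
      have hins := insertBy_split (fun a b => decide (fyGet a < fyGet b)) r
        (L1.flatMap (fun y => rs.filter (fun r' => fyGet r' == y)))
        (L2.flatMap (fun y => rs.filter (fun r' => fyGet r' == y))) h1 h2
      rw [hadd, hnewS, hlhs, ih]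
      conv_lhs => rw [← hsplit]
      rw [List.flatMap_append, List.flatMap_append, List.flatMap_cons]
      rw [flatMap_congr_mem L1 _ _ (fun y _ => hgrp y), flatMap_congr_mem L2 _ _ (fun y _ => hgrp y)]
      have hL1g : L1.flatMap (fun y => (rs.filter (fun r' => fyGet r' == y) ++ if k = y then [r] else []))
          = L1.flatMap (fun y => rs.filter (fun r' => fyGet r' == y)) := by
        apply flatMap_congr_mem
        intro y hy
        have : k ≠ y := ne_of_gt (hmemL1 y hy)
        simp [this]
      have hL2g : L2.flatMap (fun y => (rs.filter (fun r' => fyGet r' == y) ++ if k = y then [r] else []))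
          = L2.flatMap (fun y => rs.filter (fun r' => fyGet r' == y)) := by
        apply flatMap_congr_mem
        intro y hy
        have : k ≠ y := ne_of_lt (hltL2 y hy)
        simp [this]
      rw [hL1g, hL2g, hgrp k, if_pos rfl, hgrpk, hins]
      simp

lemma byYear_getD (records : List (List (String × String))) (y : String) :
    (records.foldl (fun d r => d.modify (fyGet r) [] (fun g => g ++ [r]))
      PySem.Dict.empty).getD y []
      = records.filter (fun r => fyGet r == y) := by
  rw [show records.foldl (fun d r => d.modify (fyGet r) [] (fun g => g ++ [r])) PySem.Dict.empty
      = (records.map (fun r => (fyGet r, r))).foldl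
          (fun d p => d.modify p.1 [] (fun g => g ++ [p.2])) PySem.Dict.empty
    from by rw [List.foldl_map]]
  rw [PySem.Dict.getD_foldl_modify_append]
  simp [List.filter_map, Function.comp_def]

lemma byYear_keys (records : List (List (String × String))) :
    (records.foldl (fun d r => d.modify (fyGet r) [] (fun g => g ++ [r]))
      PySem.Dict.empty).keys
      = PySem.Set.ofList (records.map fyGet) := by
  rw [PySem.Dict.keys_foldl_modify_key records fyGet [] (fun _ r => (fun g => g ++ [r]))
    PySem.Dict.empty]
  rw [PySem.Dict.keys_empty]
  rfl

lemma group_length (records : List (List (String × String))) (y : String) :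
    (records.filter (fun r => fyGet r == y)).length
      = List.count y (records.map fyGet) := by
  rw [List.count_eq_countP, List.countP_map]
  rw [List.countP_eq_length_filter]
  rfl

theorem arrangeByYear_spec : Claim_equal_arrangeByYear := by
  intro records _ _
  unfold Spec_arrangeByYear
  simp only [arrangeByYear, arrangeByYear_alt]
  -- A's grouping loop is the pure modify loop
  have hstep : records.foldl (fun d r =>
      if d.contains (fyGet r) then d.modify (fyGet r) [] (fun g => g ++ [r])
      else d.insert (fyGet r) [r]) PySem.Dict.empty
      = records.foldl (fun d r => d.modify (fyGet r) [] (fun g => g ++ [r]))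
          PySem.Dict.empty := by
    congr 1
    funext d r
    by_cases h : d.contains (fyGet r) = true
    · simp [h]
    · have h' : d.contains (fyGet r) = false := by simpa using h
      simp [h', PySem.Dict.modify, PySem.Dict.getD_of_not_contains d [] h']
  rw [hstep, byYear_keys]
  -- shared abbreviations
  have hpwYears : (PySem.List.sorted (PySem.Set.ofList (records.map fyGet)) (fun y => y) false).Pairwise (· < ·) :=
    PySem.List.sorted_ofList_pairwise_lt _
  have hndYears : (PySem.List.sorted (PySem.Set.ofList (records.map fyGet)) (fun y => y) false).Nodup :=
    (PySem.List.sorted_perm _ _ _).nodup_iff.mpr (PySem.Set.nodup_ofList _)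
  -- first component: concatenated groups = the stable sort
  have hcomb : (PySem.List.sorted (PySem.Set.ofList (records.map fyGet)) (fun y => y) false).foldl
      (fun acc y => acc ++ (records.foldl (fun d r => d.modify (fyGet r) [] (fun g => g ++ [r]))
        PySem.Dict.empty).getD y []) []
      = PySem.List.sorted records fyGet false := by
    rw [PySem.List.foldl_append_eq_flatMap, List.nil_append]
    rw [flatMap_congr_mem _ _ _ (fun y _ => byYear_getD records y)]
    exact (stable_group records).symm
  -- second component: the per-year length table = the sorted counter items
  have hcounts : records.foldl (fun d r => d.insert (fyGet r) (d.getD (fyGet r) 0 + 1))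
      PySem.Dict.empty = PySem.Dict.counter (records.map fyGet) := by
    rw [← PySem.Dict.foldl_insert_getD_add_one_eq_counter (records.map fyGet), List.foldl_map]
  have hlens : ((PySem.List.sorted (PySem.Set.ofList (records.map fyGet)) (fun y => y) false).foldl
      (fun d y => d.insert y (((records.foldl (fun d r => d.modify (fyGet r) [] (fun g => g ++ [r]))
        PySem.Dict.empty).getD y []).length : Int)) PySem.Dict.empty).items
      = (PySem.List.sorted (PySem.Set.ofList (records.map fyGet)) (fun y => y) false).map
          (fun y => (y, (List.count y (records.map fyGet) : Int))) := by
    rw [PySem.Dict.items_foldl_insert_fresh _ (fun y => y) _ PySem.Dict.empty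
      (fun a _ => PySem.Dict.contains_empty a) (by simpa using hndYears)]
    have hie : (PySem.Dict.empty : PySem.Dict String Int).items = [] := rfl
    rw [hie, List.nil_append]
    apply List.map_congr_left
    intro y _
    rw [byYear_getD records y, group_length records y]
  have hsortedItems : PySem.List.sorted (PySem.Dict.counter (records.map fyGet)).items
      (fun p => p.1) false
      = (PySem.List.sorted (PySem.Set.ofList (records.map fyGet)) (fun y => y) false).map
          (fun y => (y, (List.count y (records.map fyGet) : Int))) := by
    apply PySem.List.sorted_eq_of_perm_of_pairwise_lt
    · rw [PySem.Dict.items_counter]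
      exact (PySem.List.sorted_perm _ _ _).map _
    · exact List.Pairwise.map _ (fun a b h => h) hpwYears
  rw [hcomb, hcounts, hlens, hsortedItems]
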